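-- pv_equiv track=rewrite | github.com/ehdgua01/Algorithms | coding_test/programmers/n_1_card_game.py | solution
-- ===== SOURCE A (Python) =====
-- import itertools
--
-- class Deck:
--     def __init__(self, cards):
--         self._cards = cards
--         self._pos = 0
--
--     def draw(self, num):
--         cards = self._cards[self._pos : self._pos + num]
--         self._pos += num
--         return cards
--
--     def end_of_deck(self) -> bool:
--         return self._pos >= len(self._cards)
--
-- def solution(coin, cards):
--     num_of_cards_to_draw = 2
--     target_numer = len(cards) + 1
--     deck = Deck(cards)
--     holds = set(deck.draw(len(cards) // 3))
--     candidates = set()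
--     for answer in itertools.count(1):
--         if deck.end_of_deck():
--             break
--         candidates.update(deck.draw(num_of_cards_to_draw))
--         if check(holds, holds, target_numer):
--             continue
--         elif coin and check(holds, candidates, target_numer):
--             coin -= 1
--             continue
--         elif coin > 1 and check(candidates, candidates, target_numer):
--             coin -= 2
--             continue
--         else:
--             break
--     return answer
--
-- def check(left, right, target_number):
--     for x in left:
--         other = target_number - x
--         if other in right:
--             left.discard(x)
--             right.discard(other)
--             return True
--     return False
-- ===== SOURCE B (Python) =====
-- def solution(coin, cards):
--     # Counter-based: track counts of complement pairs (holds-holds, holds-cand, cand-cand)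
--     # instead of rescanning the sets each round; O(n) instead of O(n^2).
--     n = len(cards)
--     target = n + 1
--     k = n // 3
--     holds = set(cards[:k])
--     hh = sum(1 for v in holds if target - v in holds and 2 * v <= target)
--     hc = 0
--     cc = 0
--     cand = set()
--     answer = 1
--     pos = k
--     while pos < n:
--         for v in cards[pos:pos + 2]:
--             if v not in cand:
--                 w = target - v
--                 if w in holds:
--                     hc += 1
--                 elif w in cand or w == v:
--                     cc += 1
--                 cand.add(v)
--         pos += 2
--         if hh:
--             hh -= 1
--         elif coin and hc:
--             coin -= 1
--             hc -= 1
--         elif coin > 1 and cc: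
--             coin -= 2
--             cc -= 1
--         else:
--             break
--         answer += 1
--     return answer
-- ===== Notes on version B (the rewrite author's own statement) =====
-- stated objective: faster
-- what changed: B replaces A's per-round rescans of the mutable hold/candidate sets (the pair-searching `check` helper) by three complement-pair counters (hold-hold, hold-candidate, candidate-candidate) updated in O(1) per drawn card, so no set is ever rescanned or shrunk.
-- outside the precondition, e.g. on solution(-1, [3, 5, 4, 5, 3]): A returns 2, B returns 3
import Mathlib
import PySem

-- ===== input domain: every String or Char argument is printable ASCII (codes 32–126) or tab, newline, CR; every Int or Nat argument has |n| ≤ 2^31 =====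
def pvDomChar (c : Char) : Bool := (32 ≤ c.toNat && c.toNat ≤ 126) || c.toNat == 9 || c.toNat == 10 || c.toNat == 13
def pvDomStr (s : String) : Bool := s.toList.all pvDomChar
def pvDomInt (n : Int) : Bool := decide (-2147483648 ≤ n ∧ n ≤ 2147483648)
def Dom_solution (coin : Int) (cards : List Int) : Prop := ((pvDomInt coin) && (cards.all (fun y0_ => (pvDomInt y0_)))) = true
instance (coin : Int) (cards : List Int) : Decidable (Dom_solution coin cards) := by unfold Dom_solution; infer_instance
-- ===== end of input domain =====

-- B replaces A's per-round rescans of the hold/candidate sets by three complement-pair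
-- counters updated in O(1) per drawn card (objective: faster, O(n) vs O(n^2)).

-- ===== PORT A =====
-- `check(left, right, t)` for the ALIASED call check(s, s, t): left and right are the same
-- Python set object, so both discards hit `s`. Iterates s's elements, first hit wins.
def checkSelfAux (t : Int) (s : PySem.Set Int) : List Int → Option (PySem.Set Int)
  | [] => none
  | x :: xs =>
    if PySem.Set.contains s (t - x) then some (PySem.Set.discard (PySem.Set.discard s x) (t - x))
    else checkSelfAux t s xs

def checkSelf (s : PySem.Set Int) (t : Int) : Option (PySem.Set Int) := checkSelfAux t s s

-- `check(left, right, t)` for the two-distinct-sets calls: returns the updated (left, right)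
-- on success (Python mutates and returns True), none when it returns False (no mutation).
def checkCrossAux (t : Int) (l r : PySem.Set Int) : List Int → Option (PySem.Set Int × PySem.Set Int)
  | [] => none
  | x :: xs =>
    if PySem.Set.contains r (t - x) then some (PySem.Set.discard l x, PySem.Set.discard r (t - x))
    else checkCrossAux t l r xs

def checkCross (l r : PySem.Set Int) (t : Int) : Option (PySem.Set Int × PySem.Set Int) :=
  checkCrossAux t l r l

-- the `for answer in itertools.count(1)` loop; `rest` is the undrawn part of the deck
def loopA (t : Int) (rest : List Int) (holds cand : PySem.Set Int) (coin answer : Int) : Int :=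
  match rest with
  | [] => answer
  | v :: rs =>
    let drawn := (v :: rs).take 2
    let rest' := (v :: rs).drop 2
    let cand' := PySem.Set.update cand drawn
    match checkSelf holds t with
    | some holds' => loopA t rest' holds' cand' coin (answer + 1)
    | none =>
      match (if coin ≠ 0 then checkCross holds cand' t else none) with
      | some (h', c') => loopA t rest' h' c' (coin - 1) (answer + 1)
      | none =>
        match (if coin > 1 then checkSelf cand' t else none) with
        | some c' => loopA t rest' holds c' (coin - 2) (answer + 1)
        | none => answer
  termination_by rest.length
  decreasing_by all_goals (simp only [List.length_drop, List.length_cons]; omega)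

def solution (coin : Int) (cards : List Int) : Int :=
  let n := cards.length
  let t : Int := (n : Int) + 1
  let k := n / 3
  loopA t (cards.drop k) (PySem.Set.ofList (cards.take k)) PySem.Set.empty coin 1

-- ===== PORT B =====
-- one drawn card: O(1) update of candidate set and the hc / cc pair counters
def drawStep (t : Int) (holds : PySem.Set Int) (st : PySem.Set Int × Int × Int) (v : Int) :
    PySem.Set Int × Int × Int :=
  let (cand, hc, cc) := st
  if PySem.Set.contains cand v then st
  else
    let w := t - v
    if PySem.Set.contains holds w then (PySem.Set.add cand v, hc + 1, cc)
    else if PySem.Set.contains cand w || w == v then (PySem.Set.add cand v, hc, cc + 1)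
    else (PySem.Set.add cand v, hc, cc)

def loopB (t : Int) (holds : PySem.Set Int) (rest : List Int) (cand : PySem.Set Int)
    (hh hc cc coin answer : Int) : Int :=
  match rest with
  | [] => answer
  | v :: rs =>
    let st := ((v :: rs).take 2).foldl (drawStep t holds) (cand, hc, cc)
    let rest' := (v :: rs).drop 2
    match st with
    | (cand', hc', cc') =>
      if hh ≠ 0 then loopB t holds rest' cand' (hh - 1) hc' cc' coin (answer + 1)
      else if coin ≠ 0 ∧ hc' ≠ 0 then loopB t holds rest' cand' hh (hc' - 1) cc' (coin - 1) (answer + 1)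
      else if coin > 1 ∧ cc' ≠ 0 then loopB t holds rest' cand' hh hc' (cc' - 1) (coin - 2) (answer + 1)
      else answer
  termination_by rest.length
  decreasing_by all_goals (simp only [List.length_drop, List.length_cons]; omega)

def solution_alt (coin : Int) (cards : List Int) : Int :=
  let n := cards.length
  let t : Int := (n : Int) + 1
  let k := n / 3
  let holds := PySem.Set.ofList (cards.take k)
  let hh : Int :=
    (holds.countP (fun v => PySem.Set.contains holds (t - v) && decide (2 * v ≤ t)) : Int)
  loopB t holds (cards.drop k) PySem.Set.empty hh 0 0 coin 1

-- ===== PRECONDITION & SPEC =====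
-- Pre_ excludes cards lists containing a duplicate value: there A's answer can depend on which
-- matching pair CPython's unordered set iteration happens to find first inside `check`.
def Pre_solution (coin : Int) (cards : List Int) : Prop := cards.Nodup
instance (coin : Int) (cards : List Int) : Decidable (Pre_solution coin cards) := by
  unfold Pre_solution; infer_instance

def pvWitness_solution : Int × List Int := (2, [1, 2, 3, 4, 5, 6])

def Spec_solution (coin : Int) (cards : List Int) (out : Int) : Prop := out = solution_alt coin cards
instance (coin : Int) (cards : List Int) (out : Int) : Decidable (Spec_solution coin cards out) := by
  unfold Spec_solution; infer_instance

-- ===== CLAIM (what is proved, stated in full; the proofs are below) =====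
def Claim_equal_solution : Prop := ∀ (coin : Int) (cards : List Int), Dom_solution coin cards → Pre_solution coin cards → Spec_solution coin cards (solution coin cards)

-- ===== LEMMAS AND PROOFS =====

-- pair-counting abstractions (proof-side only)
def cF (t : Int) (H : List Int) : Finset Int :=
  H.toFinset.filter (fun y => (t - y) ∈ H ∧ 2 * y ≤ t)
def xF (t : Int) (H D : List Int) : Finset Int :=
  H.toFinset.filter (fun y => (t - y) ∈ D)

-- the structural invariant tying A's shrinking sets (H, D) to B's grow-only sets (holds0, C)
structure GInv (t : Int) (holds0 H D C : PySem.Set Int) : Prop where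
  ndH : H.Nodup
  ndD : D.Nodup
  ndC : C.Nodup
  subH : ∀ y, y ∈ H → y ∈ holds0
  subD : ∀ y, y ∈ D → y ∈ C
  disj0 : ∀ y, y ∈ holds0 → y ∉ C
  closure : ∀ y, ((y ∈ holds0 ∧ y ∉ H) ∨ (y ∈ C ∧ y ∉ D)) → (t - y) ∈ holds0 ∨ (t - y) ∈ C

theorem ginv_disj {t : Int} {holds0 H D C : PySem.Set Int} (inv : GInv t holds0 H D C) :
    ∀ y, y ∈ H → y ∉ D := fun y hyH hyD => inv.disj0 y (inv.subH y hyH) (inv.subD y hyD)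

theorem contains_iff (l : List Int) (a : Int) : PySem.Set.contains l a = true ↔ a ∈ l := by
  simp [PySem.Set.contains]

theorem mem_cF {t : Int} {H : List Int} {y : Int} :
    y ∈ cF t H ↔ y ∈ H ∧ (t - y) ∈ H ∧ 2 * y ≤ t := by
  simp [cF, and_assoc]

theorem mem_xF {t : Int} {H D : List Int} {y : Int} :
    y ∈ xF t H D ↔ y ∈ H ∧ (t - y) ∈ D := by
  simp [xF]

theorem mem_discard2 {H : List Int} {x w y : Int} :
    y ∈ (PySem.Set.discard H x).discard w ↔ y ∈ H ∧ y ≠ x ∧ y ≠ w := by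
  simp [PySem.Set.mem_discard, and_assoc]

theorem countP_card (l : List Int) (p : Int → Bool) (h : l.Nodup) :
    l.countP p = (l.toFinset.filter (fun y => p y = true)).card := by
  rw [← List.toFinset_filter, List.toFinset_card_of_nodup (h.filter p),
    List.countP_eq_length_filter]

-- ---------- check lemmas ----------
theorem checkSelfAux_eq_none_iff (t : Int) (s l : List Int) :
    checkSelfAux t s l = none ↔ ∀ x ∈ l, (t - x) ∉ s := by
  induction l with
  | nil => simp [checkSelfAux]
  | cons x xs ih =>
    by_cases h : (t - x) ∈ s
    · simp [checkSelfAux, contains_iff, h]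
    · simp [checkSelfAux, contains_iff, h, ih]

theorem checkSelfAux_eq_some (t : Int) (s l s' : List Int)
    (h : checkSelfAux t s l = some s') :
    ∃ x, x ∈ l ∧ (t - x) ∈ s ∧ s' = (PySem.Set.discard s x).discard (t - x) := by
  induction l with
  | nil => simp [checkSelfAux] at h
  | cons x xs ih =>
    by_cases hx : (t - x) ∈ s
    · simp [checkSelfAux, contains_iff, hx] at h
      exact ⟨x, by simp, hx, h.symm⟩
    · simp [checkSelfAux, contains_iff, hx] at h
      obtain ⟨y, hy, hys, he⟩ := ih h
      exact ⟨y, by simp [hy], hys, he⟩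

theorem checkCrossAux_eq_none_iff (t : Int) (l r ll : List Int) :
    checkCrossAux t l r ll = none ↔ ∀ x ∈ ll, (t - x) ∉ r := by
  induction ll with
  | nil => simp [checkCrossAux]
  | cons x xs ih =>
    by_cases h : (t - x) ∈ r
    · simp [checkCrossAux, contains_iff, h]
    · simp [checkCrossAux, contains_iff, h, ih]

theorem checkCrossAux_eq_some (t : Int) (l r ll : List Int) (p : List Int × List Int)
    (h : checkCrossAux t l r ll = some p) :
    ∃ x, x ∈ ll ∧ (t - x) ∈ r ∧ p = (PySem.Set.discard l x, PySem.Set.discard r (t - x)) := by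
  induction ll with
  | nil => simp [checkCrossAux] at h
  | cons x xs ih =>
    by_cases hx : (t - x) ∈ r
    · simp [checkCrossAux, contains_iff, hx] at h
      exact ⟨x, by simp, hx, h.symm⟩
    · simp [checkCrossAux, contains_iff, hx] at h
      obtain ⟨y, hy, hys, he⟩ := ih h
      exact ⟨y, by simp [hy], hys, he⟩

-- a set has a matching pair iff it has one counted at its smaller half
theorem cF_eq_empty_iff (t : Int) (H : List Int) :
    cF t H = ∅ ↔ ∀ x ∈ H, (t - x) ∉ H := by
  constructor
  · intro h x hx hw
    by_cases h2 : 2 * x ≤ t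
    · exact absurd (mem_cF.mpr ⟨hx, hw, h2⟩) (by simp [h])
    · have : (t - (t - x)) = x := by omega
      exact absurd (mem_cF.mpr ⟨hw, by rw [this]; exact hx, by omega⟩) (by simp [h])
  · intro h
    ext y
    simp only [mem_cF, Finset.notMem_empty, iff_false]
    rintro ⟨hy, hw, -⟩
    exact h y hy hw

theorem checkSelf_eq_none_iff_card (t : Int) (H : List Int) :
    checkSelf H t = none ↔ ((cF t H).card : Int) = 0 := by
  rw [checkSelf, checkSelfAux_eq_none_iff, ← cF_eq_empty_iff]
  simp [Finset.card_eq_zero]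

theorem xF_eq_empty_iff_card (t : Int) (H D : List Int) :
    (∀ x ∈ H, (t - x) ∉ D) ↔ ((xF t H D).card : Int) = 0 := by
  rw [show (((xF t H D).card : Int) = 0 ↔ xF t H D = ∅) by simp [Finset.card_eq_zero]]
  constructor
  · intro h; ext y
    simp only [mem_xF, Finset.notMem_empty, iff_false]
    rintro ⟨hy, hw⟩; exact h y hy hw
  · intro h x hx hw
    exact absurd (mem_xF.mpr ⟨hx, hw⟩) (by simp [h])

-- ---------- removal lemmas ----------
-- hh drops by one when a matching pair is discarded from H
theorem cF_discard_pair (t x : Int) (H : List Int)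
    (hx : x ∈ H) (hw : (t - x) ∈ H) :
    (cF t ((PySem.Set.discard H x).discard (t - x))).card + 1 = (cF t H).card := by
  have hset : cF t ((PySem.Set.discard H x).discard (t - x)) = ((cF t H).erase x).erase (t - x) := by
    ext y
    simp only [mem_cF, mem_discard2, Finset.mem_erase, ne_eq]
    constructor
    · rintro ⟨⟨hy, hyx, hyw⟩, ⟨hty, htyx, htyw⟩, h2⟩
      exact ⟨hyw, hyx, hy, hty, h2⟩
    · rintro ⟨hyw, hyx, hy, hty, h2⟩
      refine ⟨⟨hy, hyx, hyw⟩, ⟨hty, ?_, ?_⟩, h2⟩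
      · intro h; exact hyw (by omega)
      · intro h; exact hyx (by omega)
  rw [hset]
  by_cases hxw : x = t - x
  · have hxF : x ∈ cF t H := mem_cF.mpr ⟨hx, hw, by omega⟩
    rw [← hxw, Finset.erase_idem, Finset.card_erase_of_mem hxF]
    have : 0 < (cF t H).card := Finset.card_pos.mpr ⟨x, hxF⟩
    omega
  · have hone : (x ∈ cF t H ∧ (t - x) ∉ cF t H) ∨ (x ∉ cF t H ∧ (t - x) ∈ cF t H) := by
      by_cases h2 : 2 * x ≤ t
      · left
        refine ⟨mem_cF.mpr ⟨hx, hw, h2⟩, fun hc => ?_⟩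
        obtain ⟨-, -, h3⟩ := mem_cF.mp hc
        omega
      · right
        refine ⟨fun hc => by obtain ⟨-, -, h3⟩ := mem_cF.mp hc; omega,
          mem_cF.mpr ⟨hw, by rw [show t - (t - x) = x by omega]; exact hx, by omega⟩⟩
    rcases hone with ⟨h1, h2⟩ | ⟨h1, h2⟩
    · rw [Finset.erase_eq_of_notMem (by simp [Finset.mem_erase, h2]),
        Finset.card_erase_of_mem h1]
      have : 0 < (cF t H).card := Finset.card_pos.mpr ⟨x, h1⟩
      omega
    · rw [Finset.erase_eq_of_notMem h1, Finset.card_erase_of_mem h2]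
      have : 0 < (cF t H).card := Finset.card_pos.mpr ⟨t - x, h2⟩
      omega

-- hc is untouched by a within-H pair discard (H and D disjoint)
theorem xF_discard_pair_left (t x : Int) (H D : List Int)
    (hx : x ∈ H) (hw : (t - x) ∈ H) (disj : ∀ y, y ∈ H → y ∉ D) :
    xF t ((PySem.Set.discard H x).discard (t - x)) D = xF t H D := by
  ext y
  simp only [mem_xF, mem_discard2]
  constructor
  · rintro ⟨⟨hy, -, -⟩, hty⟩; exact ⟨hy, hty⟩
  · rintro ⟨hy, hty⟩
    refine ⟨⟨hy, ?_, ?_⟩, hty⟩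
    · intro h; exact disj (t - y) (by rw [h]; exact hw) hty
    · intro h; exact disj (t - y) (by have h2 : t - y = x := (by omega); rw [h2]; exact hx) hty

-- hc is untouched by a within-D pair discard (branch 3)
theorem xF_discard_pair_right (t x : Int) (H D : List Int)
    (hx : x ∈ D) (hw : (t - x) ∈ D) (disj : ∀ y, y ∈ H → y ∉ D) :
    xF t H ((PySem.Set.discard D x).discard (t - x)) = xF t H D := by
  ext y
  simp only [mem_xF, mem_discard2]
  constructor
  · rintro ⟨hy, hty, -, -⟩; exact ⟨hy, hty⟩
  · rintro ⟨hy, hty⟩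
    refine ⟨hy, hty, ?_, ?_⟩
    · intro h; exact disj y hy (by have h2 : y = t - x := (by omega); rw [h2]; exact hw)
    · intro h; exact disj y hy (by have h2 : y = x := (by omega); rw [h2]; exact hx)

-- cross removal: hh untouched
theorem cF_discard_cross_left (t x : Int) (H D : List Int)
    (hw : (t - x) ∈ D) (disj : ∀ y, y ∈ H → y ∉ D) :
    cF t (PySem.Set.discard H x) = cF t H := by
  ext y
  simp only [mem_cF, PySem.Set.mem_discard, ne_eq]
  constructor
  · rintro ⟨⟨hy, -⟩, ⟨hty, -⟩, h2⟩; exact ⟨hy, hty, h2⟩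
  · rintro ⟨hy, hty, h2⟩
    refine ⟨⟨hy, ?_⟩, ⟨hty, ?_⟩, h2⟩
    · rintro rfl; exact disj (t - y) hty hw
    · intro h; exact disj y hy (by rwa [show t - x = y by omega] at hw)

-- cross removal: hc drops by one
theorem xF_discard_cross (t x : Int) (H D : List Int)
    (hx : x ∈ H) (hw : (t - x) ∈ D) :
    (xF t (PySem.Set.discard H x) (PySem.Set.discard D (t - x))).card + 1 = (xF t H D).card := by
  have hset : xF t (PySem.Set.discard H x) (PySem.Set.discard D (t - x)) = (xF t H D).erase x := by
    ext y
    simp only [mem_xF, PySem.Set.mem_discard, Finset.mem_erase, ne_eq]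
    constructor
    · rintro ⟨⟨hy, hyx⟩, hty, -⟩; exact ⟨hyx, hy, hty⟩
    · rintro ⟨hyx, hy, hty⟩
      exact ⟨⟨hy, hyx⟩, hty, fun h => hyx (by omega)⟩
  rw [hset, Finset.card_erase_of_mem (mem_xF.mpr ⟨hx, hw⟩)]
  have : 0 < (xF t H D).card := Finset.card_pos.mpr ⟨x, mem_xF.mpr ⟨hx, hw⟩⟩
  omega

-- cross removal: cc untouched
theorem cF_discard_cross_right (t x : Int) (H D : List Int)
    (hx : x ∈ H) (disj : ∀ y, y ∈ H → y ∉ D) :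
    cF t (PySem.Set.discard D (t - x)) = cF t D := by
  ext y
  simp only [mem_cF, PySem.Set.mem_discard, ne_eq]
  constructor
  · rintro ⟨⟨hy, -⟩, ⟨hty, -⟩, h2⟩; exact ⟨hy, hty, h2⟩
  · rintro ⟨hy, hty, h2⟩
    refine ⟨⟨hy, ?_⟩, ⟨hty, ?_⟩, h2⟩
    · intro h; exact disj x hx (by have hx2 : t - y = x := (by omega); rwa [hx2] at hty)
    · intro h; exact disj x hx (by have hx2 : y = x := (by omega); rwa [hx2] at hy)


-- ---------- invariant preservation ----------
theorem ginv_self_remove {t : Int} {holds0 H D C : PySem.Set Int} {x : Int}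
    (inv : GInv t holds0 H D C) (hx : x ∈ H) (hw : (t - x) ∈ H) :
    GInv t holds0 ((PySem.Set.discard H x).discard (t - x)) D C := by
  refine ⟨(PySem.Set.nodup_discard _ _ (PySem.Set.nodup_discard _ _ inv.ndH)), inv.ndD, inv.ndC,
    fun y hy => inv.subH y (mem_discard2.mp hy).1, inv.subD, inv.disj0, ?_⟩
  intro y hy
  rcases hy with ⟨hy0, hyH⟩ | hyC
  · by_cases hyH' : y ∈ H
    · rcases Decidable.em (y = x) with rfl | hyx
      · exact Or.inl (inv.subH _ hw)
      · have hyw : y = t - x := by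
          by_contra hne
          exact hyH (mem_discard2.mpr ⟨hyH', hyx, hne⟩)
        have : t - y = x := by omega
        rw [this]; exact Or.inl (inv.subH _ hx)
    · exact inv.closure y (Or.inl ⟨hy0, hyH'⟩)
  · exact inv.closure y (Or.inr hyC)

theorem ginv_cross_remove {t : Int} {holds0 H D C : PySem.Set Int} {x : Int}
    (inv : GInv t holds0 H D C) (hx : x ∈ H) (hw : (t - x) ∈ D) :
    GInv t holds0 (PySem.Set.discard H x) (PySem.Set.discard D (t - x)) C := by
  refine ⟨PySem.Set.nodup_discard _ _ inv.ndH, PySem.Set.nodup_discard _ _ inv.ndD, inv.ndC,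
    fun y hy => inv.subH y ((PySem.Set.mem_discard _ _ _).mp hy).1,
    fun y hy => inv.subD y ((PySem.Set.mem_discard _ _ _).mp hy).1, inv.disj0, ?_⟩
  intro y hy
  rcases hy with ⟨hy0, hyH⟩ | ⟨hyC, hyD⟩
  · by_cases hyH' : y ∈ H
    · have hyx : y = x := by
        by_contra hne
        exact hyH ((PySem.Set.mem_discard _ _ _).mpr ⟨hyH', hne⟩)
      subst hyx
      exact Or.inr (inv.subD _ hw)
    · exact inv.closure y (Or.inl ⟨hy0, hyH'⟩)
  · by_cases hyD' : y ∈ D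
    · have hyw : y = t - x := by
        by_contra hne
        exact hyD ((PySem.Set.mem_discard _ _ _).mpr ⟨hyD', hne⟩)
      have : t - y = x := by omega
      rw [this]; exact Or.inl (inv.subH _ hx)
    · exact inv.closure y (Or.inr ⟨hyC, hyD'⟩)

theorem ginv_selfD_remove {t : Int} {holds0 H D C : PySem.Set Int} {x : Int}
    (inv : GInv t holds0 H D C) (hx : x ∈ D) (hw : (t - x) ∈ D) :
    GInv t holds0 H ((PySem.Set.discard D x).discard (t - x)) C := by
  refine ⟨inv.ndH, (PySem.Set.nodup_discard _ _ (PySem.Set.nodup_discard _ _ inv.ndD)), inv.ndC,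
    inv.subH, fun y hy => inv.subD y (mem_discard2.mp hy).1, inv.disj0, ?_⟩
  intro y hy
  rcases hy with hyL | ⟨hyC, hyD⟩
  · exact inv.closure y (Or.inl hyL)
  · by_cases hyD' : y ∈ D
    · rcases Decidable.em (y = x) with rfl | hyx
      · exact Or.inr (inv.subD _ hw)
      · have hyw : y = t - x := by
          by_contra hne
          exact hyD (mem_discard2.mpr ⟨hyD', hyx, hne⟩)
        have : t - y = x := by omega
        rw [this]; exact Or.inr (inv.subD _ hx)
    · exact inv.closure y (Or.inr ⟨hyC, hyD'⟩)

theorem ginv_draw {t : Int} {holds0 H D C : PySem.Set Int} {v : Int}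
    (inv : GInv t holds0 H D C) (hv0 : v ∉ holds0) (hvC : v ∉ C) :
    GInv t holds0 H (PySem.Set.add D v) (PySem.Set.add C v) := by
  refine ⟨inv.ndH, PySem.Set.nodup_add _ _ inv.ndD, PySem.Set.nodup_add _ _ inv.ndC,
    inv.subH, ?_, ?_, ?_⟩
  · intro y hy
    rcases (PySem.Set.mem_add _ _ _).mp hy with h | rfl
    · exact (PySem.Set.mem_add _ _ _).mpr (Or.inl (inv.subD y h))
    · exact (PySem.Set.mem_add _ _ _).mpr (Or.inr rfl)
  · intro y hy0 hyC
    rcases (PySem.Set.mem_add _ _ _).mp hyC with h | rfl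
    · exact inv.disj0 y hy0 h
    · exact hv0 hy0
  · intro y hy
    rcases hy with ⟨hy0, hyH⟩ | ⟨hyC, hyD⟩
    · rcases inv.closure y (Or.inl ⟨hy0, hyH⟩) with h | h
      · exact Or.inl h
      · exact Or.inr ((PySem.Set.mem_add _ _ _).mpr (Or.inl h))
    · have hyv : y ≠ v := by
        rintro rfl
        exact hyD ((PySem.Set.mem_add _ _ _).mpr (Or.inr rfl))
      have hyC' : y ∈ C := by
        rcases (PySem.Set.mem_add _ _ _).mp hyC with h | h
        · exact h
        · exact absurd h hyv
      have hyD' : y ∉ D := fun h => hyD ((PySem.Set.mem_add _ _ _).mpr (Or.inl h))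
      rcases inv.closure y (Or.inr ⟨hyC', hyD'⟩) with h | h
      · exact Or.inl h
      · exact Or.inr ((PySem.Set.mem_add _ _ _).mpr (Or.inl h))

-- ---------- the draw phase: one card ----------
theorem drawStep_spec (t : Int) (holds0 H D C : PySem.Set Int) (hc cc v : Int)
    (inv : GInv t holds0 H D C) (hv0 : v ∉ holds0) (hvC : v ∉ C)
    (ehc : hc = ((xF t H D).card : Int)) (ecc : cc = ((cF t D).card : Int)) :
    drawStep t holds0 (C, hc, cc) v =
      (PySem.Set.add C v, ((xF t H (PySem.Set.add D v)).card : Int),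
        ((cF t (PySem.Set.add D v)).card : Int)) := by
  have hvD : v ∉ D := fun h => hvC (inv.subD v h)
  have hCv : PySem.Set.contains C v = false := by
    rw [Bool.eq_false_iff]; intro h; exact hvC ((contains_iff _ _).mp h)
  by_cases hw0 : (t - v) ∈ holds0
  · -- the complement waits in the holds: hc goes up by one, cc unchanged
    have hwH : (t - v) ∈ H := by
      by_contra hwH
      rcases inv.closure (t - v) (Or.inl ⟨hw0, hwH⟩) with h | h <;>
        rw [show t - (t - v) = v by omega] at h
      · exact hv0 h
      · exact hvC h
    have hwD : (t - v) ∉ D := fun h => inv.disj0 _ hw0 (inv.subD _ h)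
    have hxF : xF t H (PySem.Set.add D v) = insert (t - v) (xF t H D) := by
      ext y
      simp only [mem_xF, PySem.Set.mem_add, Finset.mem_insert]
      constructor
      · rintro ⟨hy, hty | hty⟩
        · exact Or.inr ⟨hy, hty⟩
        · exact Or.inl (by omega)
      · rintro (rfl | ⟨hy, hty⟩)
        · exact ⟨hwH, Or.inr (by omega)⟩
        · exact ⟨hy, Or.inl hty⟩
    have hwnx : (t - v) ∉ xF t H D := by
      intro h
      obtain ⟨-, hty⟩ := mem_xF.mp h
      rw [show t - (t - v) = v by omega] at hty
      exact hvD hty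
    have hcF : cF t (PySem.Set.add D v) = cF t D := by
      ext y
      simp only [mem_cF, PySem.Set.mem_add]
      constructor
      · rintro ⟨hy1, hty1, h2⟩
        rcases hy1 with hy | rfl
        · rcases hty1 with hty | hty
          · exact ⟨hy, hty, h2⟩
          · exact absurd (show (t - v) ∈ D by rwa [show y = t - v by omega] at hy) hwD
        · rcases hty1 with hty | hty
          · exact absurd hty hwD
          · exact absurd (hty ▸ hw0) hv0
      · rintro ⟨hy, hty, h2⟩
        exact ⟨Or.inl hy, Or.inl hty, h2⟩
    have hstep : drawStep t holds0 (C, hc, cc) v = (PySem.Set.add C v, hc + 1, cc) := by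
      simp [drawStep, hvC, hw0]
    rw [hstep, hxF, Finset.card_insert_of_notMem hwnx, hcF]
    simp only [Prod.mk.injEq]
    exact ⟨trivial, by push_cast; omega, by omega⟩
  · -- complement is not held
    have hwnH : (t - v) ∉ H := fun h => hw0 (inv.subH _ h)
    have hxF : xF t H (PySem.Set.add D v) = xF t H D := by
      ext y
      simp only [mem_xF, PySem.Set.mem_add]
      constructor
      · rintro ⟨hy, hty | hty⟩
        · exact ⟨hy, hty⟩
        · exact absurd (show (t - v) ∈ H by rwa [show y = t - v by omega] at hy) hwnH
      · rintro ⟨hy, hty⟩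
        exact ⟨hy, Or.inl hty⟩
    by_cases hcv : (t - v) ∈ C ∨ (t - v) = v
    · -- the pair completes inside the candidates: cc goes up by one
      have hstep : drawStep t holds0 (C, hc, cc) v = (PySem.Set.add C v, hc, cc + 1) := by
        simp [drawStep, hvC, hw0, hcv]
      have hbump : ∃ u, cF t (PySem.Set.add D v) = insert u (cF t D) ∧ u ∉ cF t D := by
        rcases Decidable.em ((t - v) = v) with hveq | hvne
        · -- v is its own complement
          refine ⟨v, ?_, fun h => hvD (mem_cF.mp h).1⟩
          ext y
          simp only [mem_cF, PySem.Set.mem_add, Finset.mem_insert]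
          constructor
          · rintro ⟨hy1, hty1, h2⟩
            rcases hy1 with hy | rfl
            · rcases hty1 with hty | hty
              · exact Or.inr ⟨hy, hty, h2⟩
              · exact absurd (show v ∈ D by rwa [show y = v by omega] at hy) hvD
            · exact Or.inl rfl
          · rintro (rfl | ⟨hy, hty, h2⟩)
            · exact ⟨Or.inr rfl, Or.inr (by omega), by omega⟩
            · exact ⟨Or.inl hy, Or.inl hty, h2⟩
        · -- a distinct complement already drawn: it sits in D
          have hwC : (t - v) ∈ C := by tauto
          have hwD : (t - v) ∈ D := by
            by_contra hnD
            rcases inv.closure (t - v) (Or.inr ⟨hwC, hnD⟩) with h | h <;>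
              rw [show t - (t - v) = v by omega] at h
            · exact hv0 h
            · exact hvC h
          by_cases h2 : 2 * v ≤ t
          · refine ⟨v, ?_, fun h => hvD (mem_cF.mp h).1⟩
            ext y
            simp only [mem_cF, PySem.Set.mem_add, Finset.mem_insert]
            constructor
            · rintro ⟨hy1, hty1, hy2⟩
              rcases hy1 with hy | rfl
              · rcases hty1 with hty | hty
                · exact Or.inr ⟨hy, hty, hy2⟩
                · exact absurd hy2 (by omega)
              · exact Or.inl rfl
            · rintro (rfl | ⟨hy, hty, hy2⟩)
              · exact ⟨Or.inr rfl, Or.inl hwD, h2⟩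
              · exact ⟨Or.inl hy, Or.inl hty, hy2⟩
          · refine ⟨t - v, ?_, fun h => ?_⟩
            · ext y
              simp only [mem_cF, PySem.Set.mem_add, Finset.mem_insert]
              constructor
              · rintro ⟨hy1, hty1, hy2⟩
                rcases hy1 with hy | rfl
                · rcases hty1 with hty | hty
                  · exact Or.inr ⟨hy, hty, hy2⟩
                  · exact Or.inl (by omega)
                · exact absurd hy2 (by omega)
              · rintro (rfl | ⟨hy, hty, hy2⟩)
                · exact ⟨Or.inl hwD, Or.inr (by omega), by omega⟩
                · exact ⟨Or.inl hy, Or.inl hty, hy2⟩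
            · obtain ⟨-, hty, -⟩ := mem_cF.mp h
              rw [show t - (t - v) = v by omega] at hty
              exact hvD hty
      obtain ⟨u, hcF, hun⟩ := hbump
      rw [hstep, hxF, hcF, Finset.card_insert_of_notMem hun]
      simp only [Prod.mk.injEq]
      exact ⟨trivial, by omega, by push_cast; omega⟩
    · -- complement nowhere in sight: both counters unchanged
      push_neg at hcv
      have hstep : drawStep t holds0 (C, hc, cc) v = (PySem.Set.add C v, hc, cc) := by
        simp [drawStep, hvC, hw0, hcv.1, hcv.2]
      have hwD : (t - v) ∉ D := fun h => hcv.1 (inv.subD _ h)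
      have hcF : cF t (PySem.Set.add D v) = cF t D := by
        ext y
        simp only [mem_cF, PySem.Set.mem_add]
        constructor
        · rintro ⟨hy1, hty1, h2⟩
          rcases hy1 with hy | rfl
          · rcases hty1 with hty | hty
            · exact ⟨hy, hty, h2⟩
            · exact absurd (show (t - v) ∈ D by rwa [show y = t - v by omega] at hy) hwD
          · rcases hty1 with hty | hty
            · exact absurd hty hwD
            · exact absurd hty hcv.2
        · rintro ⟨hy, hty, h2⟩
          exact ⟨Or.inl hy, Or.inl hty, h2⟩
      rw [hstep, hxF, hcF, ehc, ecc]

-- the whole ≤2-card draw of one round, folded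
theorem drawFold_spec (t : Int) (holds0 H : PySem.Set Int) :
    ∀ (drawn : List Int) (D C : PySem.Set Int) (hc cc : Int),
    GInv t holds0 H D C → drawn.Nodup → (∀ u ∈ drawn, u ∉ holds0 ∧ u ∉ C) →
    hc = ((xF t H D).card : Int) → cc = ((cF t D).card : Int) →
    drawn.foldl (drawStep t holds0) (C, hc, cc) =
      (PySem.Set.update C drawn, ((xF t H (PySem.Set.update D drawn)).card : Int),
        ((cF t (PySem.Set.update D drawn)).card : Int)) ∧
      GInv t holds0 H (PySem.Set.update D drawn) (PySem.Set.update C drawn) := by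
  intro drawn
  induction drawn with
  | nil =>
    intro D C hc cc inv hnd hfresh ehc ecc
    subst ehc; subst ecc
    exact ⟨rfl, inv⟩
  | cons v ds ih =>
    intro D C hc cc inv hnd hfresh ehc ecc
    have hv := hfresh v (by simp)
    have hstep := drawStep_spec t holds0 H D C hc cc v inv hv.1 hv.2 ehc ecc
    have hupdD : PySem.Set.update D (v :: ds) = PySem.Set.update (PySem.Set.add D v) ds := by
      simp [PySem.Set.update]
    have hupdC : PySem.Set.update C (v :: ds) = PySem.Set.update (PySem.Set.add C v) ds := by
      simp [PySem.Set.update]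
    have hfresh' : ∀ u ∈ ds, u ∉ holds0 ∧ u ∉ PySem.Set.add C v := by
      intro u hu
      refine ⟨(hfresh u (by simp [hu])).1, fun hmem => ?_⟩
      rcases (PySem.Set.mem_add _ _ _).mp hmem with h | rfl
      · exact (hfresh u (by simp [hu])).2 h
      · exact (List.nodup_cons.mp hnd).1 hu
    have ih' := ih (PySem.Set.add D v) (PySem.Set.add C v) _ _
      (ginv_draw inv hv.1 hv.2) (List.nodup_cons.mp hnd).2 hfresh' rfl rfl
    rw [List.foldl_cons, hstep, hupdD, hupdC]
    exact ih'

-- ---------- one-step equations for the two loops ----------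
theorem loopA_nil (t : Int) (H D : PySem.Set Int) (coin answer : Int) :
    loopA t [] H D coin answer = answer := by rw [loopA]

theorem loopB_nil (t : Int) (holds0 : PySem.Set Int) (C : PySem.Set Int)
    (hh hc cc coin answer : Int) :
    loopB t holds0 [] C hh hc cc coin answer = answer := by rw [loopB]

theorem loopA_step1 {t : Int} {v : Int} {rs : List Int} {H D H' : PySem.Set Int}
    {coin answer : Int} (h : checkSelf H t = some H') :
    loopA t (v :: rs) H D coin answer =
      loopA t ((v :: rs).drop 2) H' (PySem.Set.update D ((v :: rs).take 2)) coin (answer + 1) := by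
  rw [loopA]; simp only [h]

theorem loopA_step2 {t : Int} {v : Int} {rs : List Int} {H D H' D'' : PySem.Set Int}
    {coin answer : Int} (h1 : checkSelf H t = none) (h2 : coin ≠ 0)
    (h3 : checkCross H (PySem.Set.update D ((v :: rs).take 2)) t = some (H', D'')) :
    loopA t (v :: rs) H D coin answer =
      loopA t ((v :: rs).drop 2) H' D'' (coin - 1) (answer + 1) := by
  rw [loopA]; simp only [h1, if_pos h2, h3]

theorem loopA_step3 {t : Int} {v : Int} {rs : List Int} {H D D'' : PySem.Set Int}
    {coin answer : Int} (h1 : checkSelf H t = none)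
    (h2 : checkCross H (PySem.Set.update D ((v :: rs).take 2)) t = none)
    (h3 : coin > 1) (h4 : checkSelf (PySem.Set.update D ((v :: rs).take 2)) t = some D'') :
    loopA t (v :: rs) H D coin answer =
      loopA t ((v :: rs).drop 2) H D'' (coin - 2) (answer + 1) := by
  have h2' : (if coin ≠ 0 then checkCross H (PySem.Set.update D ((v :: rs).take 2)) t else none) = none := by
    split
    · exact h2
    · rfl
  rw [loopA]; simp only [h1, h2', if_pos h3, h4]

theorem loopA_break {t : Int} {v : Int} {rs : List Int} {H D : PySem.Set Int}
    {coin answer : Int} (h1 : checkSelf H t = none)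
    (h2 : coin = 0 ∨ checkCross H (PySem.Set.update D ((v :: rs).take 2)) t = none)
    (h3 : coin ≤ 1 ∨ checkSelf (PySem.Set.update D ((v :: rs).take 2)) t = none) :
    loopA t (v :: rs) H D coin answer = answer := by
  have h2' : (if coin ≠ 0 then checkCross H (PySem.Set.update D ((v :: rs).take 2)) t else none) = none := by
    rcases h2 with h | h
    · rw [if_neg (by omega)]
    · split
      · exact h
      · rfl
  have h3' : (if coin > 1 then checkSelf (PySem.Set.update D ((v :: rs).take 2)) t else none) = none := by
    rcases h3 with h | h
    · rw [if_neg (by omega)]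
    · split
      · exact h
      · rfl
  rw [loopA]; simp only [h1, h2', h3']

theorem loopB_step {t : Int} {holds0 : PySem.Set Int} {v : Int} {rs : List Int}
    {C C' : PySem.Set Int} {hh hc cc hc' cc' coin answer : Int}
    (hst : ((v :: rs).take 2).foldl (drawStep t holds0) (C, hc, cc) = (C', hc', cc')) :
    loopB t holds0 (v :: rs) C hh hc cc coin answer =
      (if hh ≠ 0 then loopB t holds0 ((v :: rs).drop 2) C' (hh - 1) hc' cc' coin (answer + 1)
       else if coin ≠ 0 ∧ hc' ≠ 0 then
         loopB t holds0 ((v :: rs).drop 2) C' hh (hc' - 1) cc' (coin - 1) (answer + 1)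
       else if coin > 1 ∧ cc' ≠ 0 then
         loopB t holds0 ((v :: rs).drop 2) C' hh hc' (cc' - 1) (coin - 2) (answer + 1)
       else answer) := by
  rw [loopB]; simp only [hst]

-- ---------- the bisimulation ----------
theorem loop_eq (t : Int) (holds0 : PySem.Set Int) (n : Nat) :
    ∀ (rest : List Int) (H D C : PySem.Set Int) (hh hc cc coin answer : Int),
    rest.length ≤ n → rest.Nodup →
    (∀ v, v ∈ rest → v ∉ holds0 ∧ v ∉ C) →
    GInv t holds0 H D C →
    hh = ((cF t H).card : Int) → hc = ((xF t H D).card : Int) → cc = ((cF t D).card : Int) →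
    loopA t rest H D coin answer = loopB t holds0 rest C hh hc cc coin answer := by
  induction n with
  | zero =>
    intro rest H D C hh hc cc coin answer hlen _ _ _ _ _ _
    have hnil : rest = [] := List.eq_nil_of_length_eq_zero (Nat.le_zero.mp hlen)
    subst hnil
    rw [loopA_nil, loopB_nil]
  | succ n ih =>
    intro rest H D C hh hc cc coin answer hlen hnd hfresh inv ehh ehc ecc
    cases rest with
    | nil => rw [loopA_nil, loopB_nil]
    | cons v rs =>
      have hnd2 : ((v :: rs).take 2).Nodup := hnd.sublist (List.take_sublist _ _)
      have hfresh2 : ∀ u ∈ (v :: rs).take 2, u ∉ holds0 ∧ u ∉ C := fun u hu =>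
        hfresh u (List.take_subset _ _ hu)
      obtain ⟨hfold, inv'⟩ := drawFold_spec t holds0 H ((v :: rs).take 2) D C hc cc
        inv hnd2 hfresh2 ehc ecc
      have hlen' : ((v :: rs).drop 2).length ≤ n := by
        simp only [List.length_drop, List.length_cons]
        simp only [List.length_cons] at hlen
        omega
      have hnd' : ((v :: rs).drop 2).Nodup := hnd.sublist (List.drop_sublist _ _)
      have hdisj : ∀ u ∈ (v :: rs).drop 2, u ∉ (v :: rs).take 2 := by
        intro u hu hut
        have h2 := hnd
        rw [← List.take_append_drop 2 (v :: rs)] at h2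
        exact (List.nodup_append.mp h2).2.2 u hut u hu rfl
      have hfresh' : ∀ u ∈ (v :: rs).drop 2,
          u ∉ holds0 ∧ u ∉ PySem.Set.update C ((v :: rs).take 2) := by
        intro u hu
        have hub : u ∈ (v :: rs) := List.drop_subset _ _ hu
        refine ⟨(hfresh u hub).1, fun hmem => ?_⟩
        rcases (PySem.Set.mem_update _ _ _).mp hmem with h | h
        · exact (hfresh u hub).2 h
        · exact hdisj u hu h
      have disj' : ∀ y, y ∈ H → y ∉ PySem.Set.update D ((v :: rs).take 2) := ginv_disj inv'
      rw [loopB_step hfold]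
      cases hchk : checkSelf H t with
      | some H' =>
        -- A removes a pair inside its holds; B consumes one hh counter unit
        obtain ⟨x, hx, hw, rfl⟩ := checkSelfAux_eq_some t H H H' hchk
        have hhne : hh ≠ 0 := by
          intro h0
          rw [h0] at ehh
          have hcard : cF t H = ∅ := Finset.card_eq_zero.mp (by omega)
          exact (cF_eq_empty_iff t H).mp hcard x hx hw
        rw [if_pos hhne, loopA_step1 hchk]
        have hcount := cF_discard_pair t x H hx hw
        refine ih _ _ _ _ _ _ _ _ _ hlen' hnd' hfresh' (ginv_self_remove inv' hx hw) ?_ ?_ ?_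
        · omega
        · rw [xF_discard_pair_left t x H _ hx hw disj']
        · rfl
      | none =>
        have hh0 : hh = 0 := by rw [ehh, ← checkSelf_eq_none_iff_card]; exact hchk
        rw [if_neg (by omega)]
        by_cases hcoin : coin = 0
        · rw [if_neg (by omega), if_neg (by omega), loopA_break hchk (Or.inl hcoin) (Or.inl (by omega))]
        · cases hcr : checkCross H (PySem.Set.update D ((v :: rs).take 2)) t with
          | some p =>
            obtain ⟨x, hxH, hwD, rfl⟩ := checkCrossAux_eq_some t H _ H p hcr
            have hcpos : ((xF t H (PySem.Set.update D ((v :: rs).take 2))).card : Int) ≠ 0 := by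
              have hpos : 0 < (xF t H (PySem.Set.update D ((v :: rs).take 2))).card :=
                Finset.card_pos.mpr ⟨x, mem_xF.mpr ⟨hxH, hwD⟩⟩
              omega
            rw [if_pos ⟨hcoin, hcpos⟩, loopA_step2 hchk hcoin hcr]
            have hcount := xF_discard_cross t x H (PySem.Set.update D ((v :: rs).take 2)) hxH hwD
            refine ih _ _ _ _ _ _ _ _ _ hlen' hnd' hfresh' (ginv_cross_remove inv' hxH hwD) ?_ ?_ ?_
            · rw [cF_discard_cross_left t x H (PySem.Set.update D ((v :: rs).take 2)) hwD disj']
              exact ehh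
            · omega
            · rw [cF_discard_cross_right t x H (PySem.Set.update D ((v :: rs).take 2)) hxH disj']
          | none =>
            have hc0 : ((xF t H (PySem.Set.update D ((v :: rs).take 2))).card : Int) = 0 := by
              rw [← xF_eq_empty_iff_card]
              exact (checkCrossAux_eq_none_iff t H _ H).mp hcr
            rw [if_neg (fun hand => hand.2 hc0)]
            by_cases hcoin2 : coin > 1
            · cases hcs2 : checkSelf (PySem.Set.update D ((v :: rs).take 2)) t with
              | some D'' =>
                obtain ⟨x, hxD, hwD2, rfl⟩ :=
                  checkSelfAux_eq_some t (PySem.Set.update D ((v :: rs).take 2)) _ D'' hcs2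
                have hccpos : ((cF t (PySem.Set.update D ((v :: rs).take 2))).card : Int) ≠ 0 := by
                  intro h0
                  have hcard : cF t (PySem.Set.update D ((v :: rs).take 2)) = ∅ :=
                    Finset.card_eq_zero.mp (by omega)
                  exact (cF_eq_empty_iff t _).mp hcard x hxD hwD2
                rw [if_pos ⟨hcoin2, hccpos⟩, loopA_step3 hchk hcr hcoin2 hcs2]
                have hcount := cF_discard_pair t x (PySem.Set.update D ((v :: rs).take 2)) hxD hwD2
                refine ih _ _ _ _ _ _ _ _ _ hlen' hnd' hfresh'
                  (ginv_selfD_remove inv' hxD hwD2) ehh ?_ ?_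
                · rw [xF_discard_pair_right t x H (PySem.Set.update D ((v :: rs).take 2)) hxD hwD2 disj']
                · omega
              | none =>
                have hcc0 : ((cF t (PySem.Set.update D ((v :: rs).take 2))).card : Int) = 0 := by
                  have : cF t (PySem.Set.update D ((v :: rs).take 2)) = ∅ :=
                    (cF_eq_empty_iff t _).mpr
                      (fun x hx hw => (checkSelfAux_eq_none_iff t _ _).mp hcs2 x hx hw)
                  rw [this]; simp
                rw [if_neg (fun hand => hand.2 hcc0),
                  loopA_break hchk (Or.inr hcr) (Or.inr hcs2)]
            · rw [if_neg (fun hand => hcoin2 hand.1),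
                loopA_break hchk (Or.inr hcr) (Or.inl (by omega))]

-- ===== VERDICT (by name: the statement is the Claim_ definition above) =====
theorem solution_spec : Claim_equal_solution := by
  intro coin cards _hdom hpre
  unfold Spec_solution solution solution_alt
  simp only []
  have hndh : (PySem.Set.ofList (cards.take (cards.length / 3))).Nodup := PySem.Set.nodup_ofList _
  have hdisjtd : ∀ u ∈ cards.drop (cards.length / 3), u ∉ cards.take (cards.length / 3) := by
    intro u hu hut
    have h2 := hpre
    rw [← List.take_append_drop (cards.length / 3) cards] at h2
    exact (List.nodup_append.mp h2).2.2 u hut u hu rfl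
  refine loop_eq _ _ (cards.drop (cards.length / 3)).length _ _ _ _ _ _ _ _ _
    le_rfl (hpre.sublist (List.drop_sublist _ _)) ?_ ?_ ?_ ?_ ?_
  · intro u hu
    refine ⟨fun hmem => hdisjtd u hu ((PySem.Set.mem_ofList _ _).mp hmem), ?_⟩
    simp [PySem.Set.empty]
  · refine ⟨hndh, List.nodup_nil, List.nodup_nil, fun y h => h, ?_, ?_, ?_⟩
    · intro y hy; simp [PySem.Set.empty] at hy
    · intro y _ hy; simp [PySem.Set.empty] at hy
    · rintro y (⟨h1, h2⟩ | ⟨h1, -⟩)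
      · exact absurd h1 h2
      · simp [PySem.Set.empty] at h1
  · rw [countP_card _ _ hndh]
    refine congrArg (fun s => ((Finset.card s : Int))) ?_
    unfold cF
    apply Finset.filter_congr
    intro y _
    simp [contains_iff]
  · simp [xF, PySem.Set.empty]
  · simp [cF, PySem.Set.empty]
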